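-- pv_equiv track=rewrite | github.com/cyuab/time-series-classification-cleavage | code/transformations.py | transform_cum
-- ===== SOURCE A (Python) =====
-- def transform_cum(seq, seq_prob=None, prefix=None, prefix_prob=None):
--     """
--     Cumulative mapping
--     """
--     if prefix:
--         res1, res2 = transform_cum(prefix, prefix_prob)
--     ts = [None] * (len(seq)+1)
--     ts[0] = 0
--     for i in range(len(seq)):
--         if seq_prob:
--             prob = seq_prob[i]
--         else:
--             prob = 1
--         if seq[i] == 'A':
--             ts[i+1] = ts[i] + 2 * prob
--         elif seq[i] == 'G':
--             ts[i+1] = ts[i] + 1 * prob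
--         elif seq[i] == 'C':
--             ts[i+1] = ts[i] - 1 * prob
--         elif seq[i] == 'U':
--             ts[i+1] = ts[i] - 2 * prob
--         elif seq[i] == '_':
--             ts[i+1] = ts[i]
--         else:
--             raise ValueError('The sequence contains invalid characters')
--     try:
--         return ([x + res1[-1] for x in ts]), None
--     except:
--         return ts, None
-- ===== SOURCE B (Python) =====
-- _VAL = {'A': 2, 'G': 1, 'C': -1, 'U': -2, '_': 0}
--
-- def _val(c):
--     try:
--         return _VAL[c]
--     except KeyError:
--         raise ValueError('The sequence contains invalid characters')
--
-- def transform_cum(seq, seq_prob=None, prefix=None, prefix_prob=None):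
--     """Cumulative mapping, without the self-recursive prefix call:
--     the prefix contributes only a starting offset, computed as a plain sum."""
--     offset = 0
--     if prefix:
--         for i, c in enumerate(prefix):
--             offset += _val(c) * (prefix_prob[i] if prefix_prob else 1)
--     res = [offset]
--     for i, c in enumerate(seq):
--         res.append(res[-1] + _val(c) * (seq_prob[i] if seq_prob else 1))
--     return res, None
-- ===== Notes on version B (the rewrite author's own statement) =====
-- stated objective: simpler
-- what changed: B eliminates A's self-recursive prefix call and the post-hoc '[x + res1[-1] for x in ts]' shift: it computes the starting offset directly as the sum of value*prob over the prefix, maps characters through a dict {'A':2,'G':1,'C':-1,'U':-2,'_':0} instead of an if/elif chain, and builds the result as one running cumulative sum starting at that offset.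
import Mathlib
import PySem

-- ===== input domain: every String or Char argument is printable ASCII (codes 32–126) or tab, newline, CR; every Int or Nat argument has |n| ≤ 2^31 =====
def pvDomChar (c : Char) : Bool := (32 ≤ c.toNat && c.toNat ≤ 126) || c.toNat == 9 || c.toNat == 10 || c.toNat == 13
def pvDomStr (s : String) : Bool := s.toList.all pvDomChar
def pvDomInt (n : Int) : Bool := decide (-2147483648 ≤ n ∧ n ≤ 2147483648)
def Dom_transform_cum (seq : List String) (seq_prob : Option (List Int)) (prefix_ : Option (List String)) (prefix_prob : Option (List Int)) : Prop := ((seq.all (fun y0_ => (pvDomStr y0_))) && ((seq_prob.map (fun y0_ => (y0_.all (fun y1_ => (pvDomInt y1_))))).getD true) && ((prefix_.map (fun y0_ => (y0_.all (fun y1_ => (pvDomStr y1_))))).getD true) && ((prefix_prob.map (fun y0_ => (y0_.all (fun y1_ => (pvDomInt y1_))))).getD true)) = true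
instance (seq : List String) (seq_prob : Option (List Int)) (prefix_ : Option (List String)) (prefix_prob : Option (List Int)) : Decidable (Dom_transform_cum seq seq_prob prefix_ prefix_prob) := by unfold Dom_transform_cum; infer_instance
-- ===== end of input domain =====

-- B replaces A's self-recursive prefix call + post-hoc list shift by a directly
-- computed starting offset and one running cumulative sum (objective: simpler).

-- Python truthiness of an optional list argument ('if prefix:', 'if seq_prob:')
def pyTruthy {α : Type} (o : Option (List α)) : Bool :=
  match o with
  | some (_ :: _) => true
  | _ => false

-- ===== PORT A =====
-- The loop fills ts[i+1] from ts[i]; ported as the list grown left-to-right; the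
-- invalid-character branch (Python: raise ValueError) and out-of-range prob
-- indexing (Python: IndexError) are excluded by Pre_transform_cum below.
def transform_cum (seq : List String) (seq_prob : Option (List Int)) (prefix_ : Option (List String)) (prefix_prob : Option (List Int)) : List Int × Option Int :=
  let ts := (PySem.List.pyRange 0 (seq.length : Int) 1).foldl (fun ts i =>
      let prob : Int := if pyTruthy seq_prob then PySem.List.pyGetD (seq_prob.getD []) i 0 else 1
      let t := ts.getLastD 0
      let c := PySem.List.pyGetD seq i ""
      if c = "A" then ts ++ [t + 2 * prob]
      else if c = "G" then ts ++ [t + 1 * prob]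
      else if c = "C" then ts ++ [t - 1 * prob]
      else if c = "U" then ts ++ [t - 2 * prob]
      else if c = "_" then ts ++ [t]
      else ts ++ [t]) [0]   -- Python raises ValueError here; outside Pre_
  if h : pyTruthy prefix_ = true then
    let res1 := (transform_cum (prefix_.getD []) prefix_prob none none).1
    (ts.map (fun x => x + res1.getLastD 0), none)   -- [x + res1[-1] for x in ts]
  else
    (ts, none)   -- except: res1 undefined (NameError caught)
termination_by (if pyTruthy prefix_ then 1 else 0)
decreasing_by simp [h]; rfl

-- ===== PORT B =====
def pvValMap : PySem.Dict String Int :=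
  PySem.Dict.ofList [("A", 2), ("G", 1), ("C", -1), ("U", -2), ("_", 0)]

-- _val: dict lookup; KeyError → ValueError in Python, excluded by Pre_
def pvVal (c : String) : Int := (pvValMap.get? c).getD 0

def transform_cum_alt (seq : List String) (seq_prob : Option (List Int)) (prefix_ : Option (List String)) (prefix_prob : Option (List Int)) : List Int × Option Int :=
  let offset : Int :=
    if pyTruthy prefix_ then
      (PySem.List.enumerate (prefix_.getD [])).foldl (fun acc ic =>
        acc + pvVal ic.2 * (if pyTruthy prefix_prob then PySem.List.pyGetD (prefix_prob.getD []) ic.1 0 else 1)) 0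
    else 0
  let res := (PySem.List.enumerate seq).foldl (fun res ic =>
      res ++ [res.getLastD 0 + pvVal ic.2 * (if pyTruthy seq_prob then PySem.List.pyGetD (seq_prob.getD []) ic.1 0 else 1)]) [offset]
  (res, none)

-- ===== PRECONDITION & SPEC =====
-- Pre_ excludes exactly the inputs on which A raises: an element of seq (or of a
-- truthy prefix) other than "A"/"G"/"C"/"U"/"_" (ValueError), or a truthy prob
-- list shorter than the sequence it is indexed by (IndexError).
def Pre_transform_cum (seq : List String) (seq_prob : Option (List Int)) (prefix_ : Option (List String)) (prefix_prob : Option (List Int)) : Prop :=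
  (∀ s ∈ seq, s = "A" ∨ s = "G" ∨ s = "C" ∨ s = "U" ∨ s = "_") ∧
  (pyTruthy seq_prob = true → seq.length ≤ (seq_prob.getD []).length) ∧
  (pyTruthy prefix_ = true →
    (∀ s ∈ prefix_.getD [], s = "A" ∨ s = "G" ∨ s = "C" ∨ s = "U" ∨ s = "_") ∧
    (pyTruthy prefix_prob = true → (prefix_.getD []).length ≤ (prefix_prob.getD []).length))
instance (seq : List String) (seq_prob : Option (List Int)) (prefix_ : Option (List String)) (prefix_prob : Option (List Int)) : Decidable (Pre_transform_cum seq seq_prob prefix_ prefix_prob) := by unfold Pre_transform_cum; infer_instance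

def pvWitness_transform_cum : List String × Option (List Int) × Option (List String) × Option (List Int) :=
  (["A", "G", "_"], some [2, -1, 3], some ["C", "U"], none)

def Spec_transform_cum (seq : List String) (seq_prob : Option (List Int)) (prefix_ : Option (List String)) (prefix_prob : Option (List Int)) (out : List Int × Option Int) : Prop := out = transform_cum_alt seq seq_prob prefix_ prefix_prob
instance (seq : List String) (seq_prob : Option (List Int)) (prefix_ : Option (List String)) (prefix_prob : Option (List Int)) (out : List Int × Option Int) : Decidable (Spec_transform_cum seq seq_prob prefix_ prefix_prob out) := by unfold Spec_transform_cum; infer_instance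

-- ===== CLAIM (what is proved, stated in full; the proofs are below) =====
def Claim_equal_transform_cum : Prop := ∀ (seq : List String) (seq_prob : Option (List Int)) (prefix_ : Option (List String)) (prefix_prob : Option (List Int)), Dom_transform_cum seq seq_prob prefix_ prefix_prob → Pre_transform_cum seq seq_prob prefix_ prefix_prob → Spec_transform_cum seq seq_prob prefix_ prefix_prob (transform_cum seq seq_prob prefix_ prefix_prob)

-- ===== LEMMAS AND PROOFS =====

-- the common shape of both cumulative loops: append last + delta(i)
def pvStep (d : Int → Int) : List Int → Int → List Int :=
  fun ts i => ts ++ [ts.getLastD 0 + d i]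

-- the per-index delta both programs add, as a function of the input lists
def pvDelta (seq : List String) (sp : Option (List Int)) (i : Int) : Int :=
  pvVal (PySem.List.pyGetD seq i "") *
    (if pyTruthy sp then PySem.List.pyGetD (sp.getD []) i 0 else 1)

theorem pvGetLastD_map_add (c : Int) (acc : List Int) (h : acc ≠ []) :
    (acc.map (fun x => x + c)).getLastD 0 = acc.getLastD 0 + c := by
  induction acc with
  | nil => exact absurd rfl h
  | cons a t ih =>
    cases t with
    | nil => simp
    | cons b t' => simpa using ih (by simp)

theorem pvFoldl_step_map (d : Int → Int) (c : Int) (L : List Int) :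
    ∀ acc, acc ≠ [] →
      (L.foldl (pvStep d) acc).map (fun x => x + c) = L.foldl (pvStep d) (acc.map (fun x => x + c)) := by
  induction L with
  | nil => intro acc _; rfl
  | cons i L ih =>
    intro acc hacc
    have : (pvStep d acc i).map (fun x => x + c) = pvStep d (acc.map (fun x => x + c)) i := by
      unfold pvStep
      rw [List.map_append, pvGetLastD_map_add c acc hacc]
      congr 1
      simp
      ring
    simp only [List.foldl_cons, ih (pvStep d acc i) (by simp [pvStep]), this]

theorem pvFoldl_step_last (d : Int → Int) (L : List Int) :
    ∀ acc, acc ≠ [] →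
      (L.foldl (pvStep d) acc).getLastD 0 = acc.getLastD 0 + (L.map d).sum := by
  induction L with
  | nil => intro acc _; simp
  | cons i L ih =>
    intro acc hacc
    have h1 : (pvStep d acc i).getLastD 0 = acc.getLastD 0 + d i := by simp [pvStep]
    simp only [List.foldl_cons, List.map_cons, List.sum_cons,
      ih (pvStep d acc i) (by simp [pvStep]), h1]
    ring

-- A's loop body equals pvStep (pvDelta …) on every in-range index with a valid char
theorem pvAstep_eq (seq : List String) (sp : Option (List Int))
    (hv : ∀ s ∈ seq, s = "A" ∨ s = "G" ∨ s = "C" ∨ s = "U" ∨ s = "_")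
    (i : Int) (hi : i ∈ PySem.List.pyRange 0 (seq.length : Int) 1) (ts : List Int) :
    (let prob : Int := if pyTruthy sp then PySem.List.pyGetD (sp.getD []) i 0 else 1
     let t := ts.getLastD 0
     let c := PySem.List.pyGetD seq i ""
     if c = "A" then ts ++ [t + 2 * prob]
     else if c = "G" then ts ++ [t + 1 * prob]
     else if c = "C" then ts ++ [t - 1 * prob]
     else if c = "U" then ts ++ [t - 2 * prob]
     else if c = "_" then ts ++ [t]
     else ts ++ [t]) = pvStep (pvDelta seq sp) ts i := by
  rw [PySem.List.mem_pyRange_one] at hi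
  have hmem : PySem.List.pyGetD seq i "" ∈ seq :=
    PySem.List.pyGetD_mem seq "" (by simp [PySem.Raise.InRange]; omega)
  have hval := hv _ hmem
  have vA : pvVal "A" = 2 := by decide
  have vG : pvVal "G" = 1 := by decide
  have vC : pvVal "C" = -1 := by decide
  have vU : pvVal "U" = -2 := by decide
  have vB : pvVal "_" = 0 := by decide
  rcases hval with h | h | h | h | h <;>
    simp [pvStep, pvDelta, h, vA, vG, vC, vU, vB, sub_eq_add_neg] <;> split <;> ring

-- B's seq loop equals the pvStep fold over the index range
theorem pvBloop_eq (seq : List String) (sp : Option (List Int)) (acc : List Int) :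
    (PySem.List.enumerate seq).foldl (fun res ic =>
        res ++ [res.getLastD 0 + pvVal ic.2 * (if pyTruthy sp then PySem.List.pyGetD (sp.getD []) ic.1 0 else 1)]) acc
      = (PySem.List.pyRange 0 (seq.length : Int) 1).foldl (pvStep (pvDelta seq sp)) acc := by
  rw [PySem.List.enumerate_eq_map_pyRange (d := ""), List.foldl_map]
  rfl

-- B's offset loop is the sum of the deltas
theorem pvBoffset_eq (pf : List String) (pp : Option (List Int)) :
    (PySem.List.enumerate pf).foldl (fun acc ic =>
        acc + pvVal ic.2 * (if pyTruthy pp then PySem.List.pyGetD (pp.getD []) ic.1 0 else 1)) 0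
      = ((PySem.List.pyRange 0 (pf.length : Int) 1).map (pvDelta pf pp)).sum := by
  rw [PySem.List.enumerate_eq_map_pyRange (d := ""), List.foldl_map]
  have := PySem.List.foldl_add (l := PySem.List.pyRange 0 (pf.length : Int) 1)
    (g := pvDelta pf pp) (a := 0)
  simpa [pvDelta] using this

-- A's loop rewritten to the common shape
theorem pvAloop_eq (seq : List String) (sp : Option (List Int))
    (hv : ∀ s ∈ seq, s = "A" ∨ s = "G" ∨ s = "C" ∨ s = "U" ∨ s = "_") :
    ((PySem.List.pyRange 0 (seq.length : Int) 1).foldl (fun ts i =>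
      let prob : Int := if pyTruthy sp then PySem.List.pyGetD (sp.getD []) i 0 else 1
      let t := ts.getLastD 0
      let c := PySem.List.pyGetD seq i ""
      if c = "A" then ts ++ [t + 2 * prob]
      else if c = "G" then ts ++ [t + 1 * prob]
      else if c = "C" then ts ++ [t - 1 * prob]
      else if c = "U" then ts ++ [t - 2 * prob]
      else if c = "_" then ts ++ [t]
      else ts ++ [t]) [0])
      = (PySem.List.pyRange 0 (seq.length : Int) 1).foldl (pvStep (pvDelta seq sp)) [0] := by
  apply PySem.List.foldl_congr_mem
  intro acc i hi
  exact pvAstep_eq seq sp hv i hi acc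

-- ===== VERDICT (by name: the statement is the Claim_ definition above) =====
theorem transform_cum_spec : Claim_equal_transform_cum := by
  intro seq sp pf pp _ hpre
  obtain ⟨hv, _, hpf⟩ := hpre
  unfold Spec_transform_cum
  rw [transform_cum]
  simp only [transform_cum_alt]
  by_cases h : pyTruthy pf = true
  · obtain ⟨hvp, _⟩ := hpf h
    rw [transform_cum]
    simp only [h, dite_true, if_pos,
      show pyTruthy (none : Option (List String)) = false from rfl,
      Bool.false_eq_true, dite_false]
    rw [pvAloop_eq seq sp hv, pvAloop_eq (pf.getD []) pp hvp, pvBloop_eq, pvBoffset_eq]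
    have hlast : ((PySem.List.pyRange 0 (((pf.getD [] : List String)).length : Int) 1).foldl (pvStep (pvDelta (pf.getD []) pp)) [0]).getLastD 0
        = ((PySem.List.pyRange 0 (((pf.getD [] : List String)).length : Int) 1).map (pvDelta (pf.getD []) pp)).sum := by
      rw [pvFoldl_step_last _ _ [0] (by simp)]; simp
    rw [hlast, pvFoldl_step_map _ _ _ [0] (by simp)]
    simp
  · simp only [h, Bool.false_eq_true, dite_false, if_false]
    rw [pvAloop_eq seq sp hv, pvBloop_eq]
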